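-- pv_equiv track=rewrite | github.com/maheraroksana/Nursecare-2024 | Testing/2Mar-testing.py | generate_timestamp
-- ===== SOURCE A (Python) =====
-- def generate_timestamp(len_file):
--     time_intervals = []
--     for i in range(len_file):
--         minutes, seconds = divmod(i, 60)
--         start_time = f"{int(minutes):02d}:{int(seconds):02d}"
--         minutes, seconds = divmod(i+1, 60)
--         end_time = f"{int(minutes):02d}:{int(seconds):02d}"
--         time_interval = f"{start_time} - {end_time}"
--         time_intervals.append(time_interval)
--     return time_intervals
-- ===== SOURCE B (Python) =====
-- def generate_timestamp(len_file):
--     labels = []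
--     for i in range(len_file + 1):
--         m, s = divmod(i, 60)
--         labels.append(f"{m:02d}:{s:02d}")
--     return [f"{a} - {b}" for a, b in zip(labels, labels[1:])]
-- ===== Notes on version B (the rewrite author's own statement) =====
-- stated objective: faster
-- what changed: B precomputes the table of boundary labels in one pass and then builds the intervals in a second pass by zipping adjacent labels, so each label is formatted once instead of twice as in A's per-index loop that recomputes both divmod/format endpoints.
import Mathlib
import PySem

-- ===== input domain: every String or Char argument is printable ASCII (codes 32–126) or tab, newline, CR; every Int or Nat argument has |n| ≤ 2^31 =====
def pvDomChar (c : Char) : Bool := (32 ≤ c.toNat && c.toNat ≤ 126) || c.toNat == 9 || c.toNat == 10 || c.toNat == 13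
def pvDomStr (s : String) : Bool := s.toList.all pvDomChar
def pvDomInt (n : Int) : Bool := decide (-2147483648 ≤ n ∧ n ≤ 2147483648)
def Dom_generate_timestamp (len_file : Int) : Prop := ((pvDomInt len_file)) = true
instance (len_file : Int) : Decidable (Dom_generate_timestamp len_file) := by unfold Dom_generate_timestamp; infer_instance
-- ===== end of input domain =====

-- B changes the decomposition: it precomputes a table of boundary labels in one pass,
-- then pairs adjacent labels in a second pass, instead of recomputing both divmods per index.


-- shared formatting helper: f"{n:02d}" for the nonnegative n both programs produce = str(n).zfill(2)
def pvFmt2 (n : Int) : String := PySem.Str.zfill (PySem.Int.toStr n) 2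

-- ===== PORT A =====
def generate_timestamp (len_file : Int) : List String :=
  (PySem.List.pyRange 0 len_file 1).foldl
    (fun time_intervals i =>
      let start_time := pvFmt2 (PySem.Int.floordiv i 60) ++ ":" ++ pvFmt2 (PySem.Int.mod i 60)
      let end_time := pvFmt2 (PySem.Int.floordiv (i+1) 60) ++ ":" ++ pvFmt2 (PySem.Int.mod (i+1) 60)
      time_intervals ++ [start_time ++ " - " ++ end_time]) []

-- ===== PORT B =====
def gt_label (i : Int) : String :=
  pvFmt2 (PySem.Int.floordiv i 60) ++ ":" ++ pvFmt2 (PySem.Int.mod i 60)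

def generate_timestamp_alt (len_file : Int) : List String :=
  let labels := (PySem.List.pyRange 0 (len_file + 1) 1).map gt_label
  (labels.zip (labels.drop 1)).map (fun p => p.1 ++ " - " ++ p.2)

-- ===== PRECONDITION & SPEC =====
def Spec_generate_timestamp (len_file : Int) (out : List String) : Prop := out = generate_timestamp_alt len_file
instance (len_file : Int) (out : List String) : Decidable (Spec_generate_timestamp len_file out) := by unfold Spec_generate_timestamp; infer_instance

-- ===== CLAIM (what is proved, stated in full; the proofs are below) =====
def Claim_equal_generate_timestamp : Prop := ∀ (len_file : Int), Dom_generate_timestamp len_file → Spec_generate_timestamp len_file (generate_timestamp len_file)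

-- ===== LEMMAS AND PROOFS =====

-- pairing adjacent elements of a label table over pyRange a (a+k+1) equals mapping over pyRange a (a+k)
theorem adjPairs_map_pyRange {α β : Type} (g : Int → α) (h : α × α → β) :
    ∀ (k : Nat) (a : Int),
      (let L := (PySem.List.pyRange a (a + k + 1) 1).map g
       (L.zip (L.drop 1)).map h)
      = (PySem.List.pyRange a (a + k) 1).map (fun i => h (g i, g (i+1))) := by
  intro k
  induction k with
  | zero =>
    intro a
    rw [PySem.List.pyRange_one_cons (by omega : a < a + (0:Nat) + 1),
        PySem.List.pyRange_one_eq_nil (by omega : a + (0:Nat) + 1 ≤ a + 1),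
        PySem.List.pyRange_one_eq_nil (by omega : a + (0:Nat) ≤ a)]
    simp
  | succ k ih =>
    intro a
    simp only [Nat.cast_add, Nat.cast_one]
    have h1 : PySem.List.pyRange a (a + ((k:Int)+1) + 1) 1
        = a :: PySem.List.pyRange (a+1) (a + ((k:Int)+1) + 1) 1 :=
      PySem.List.pyRange_one_cons (by omega)
    have h2 : PySem.List.pyRange (a+1) (a + ((k:Int)+1) + 1) 1
        = (a+1) :: PySem.List.pyRange (a+1+1) (a + ((k:Int)+1) + 1) 1 :=
      PySem.List.pyRange_one_cons (by omega)
    have h3 : PySem.List.pyRange a (a + ((k:Int)+1)) 1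
        = a :: PySem.List.pyRange (a+1) (a + ((k:Int)+1)) 1 :=
      PySem.List.pyRange_one_cons (by omega)
    have ihs := ih (a+1)
    rw [show a+1+(k:Int)+1 = a+((k:Int)+1)+1 by ring,
        show a+1+(k:Int) = a+((k:Int)+1) by ring] at ihs
    simp only at ihs
    rw [h2, List.map_cons, List.drop_succ_cons, List.drop_zero] at ihs
    rw [h1, h3, List.map_cons, List.drop_succ_cons, List.drop_zero, h2,
        List.map_cons, List.zip_cons_cons, List.map_cons, List.map_cons, ihs]

theorem gen_eq_map (n : Int) :
    generate_timestamp n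
    = (PySem.List.pyRange 0 n 1).map (fun i => gt_label i ++ " - " ++ gt_label (i+1)) := by
  unfold generate_timestamp gt_label
  rw [PySem.List.foldl_append_singleton_eq_map]
  simp

-- ===== VERDICT (by name: the statement is the Claim_ definition above) =====
theorem generate_timestamp_spec : Claim_equal_generate_timestamp := by
  intro n _
  unfold Spec_generate_timestamp generate_timestamp_alt
  rw [gen_eq_map]
  by_cases hn : 0 ≤ n
  · have hk : n = ((n.toNat : Int)) := by omega
    have := adjPairs_map_pyRange (g := gt_label)
      (h := fun p => p.1 ++ " - " ++ p.2) n.toNat 0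
    simp only [zero_add] at this
    rw [hk, this]
  · rw [PySem.List.pyRange_one_eq_nil (by omega : n ≤ 0),
        PySem.List.pyRange_one_eq_nil (by omega : n + 1 ≤ 0)]
    simp
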